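-- pv_equiv track=rewrite | github.com/aws-neuron/nki-library | src/nkilib_src/nkilib/core/attention/attention_bwd.py | get_required_tiles_mask
-- ===== SOURCE A (Python) =====
-- from typing import Any, List, Optional, Tuple
--
-- def get_required_tiles_mask(
--     q_tile_group_size: int,
--     use_causal_mask: bool,
--     i_q_seq_tile: int,
--     q_seq_tile_size: int,
--     k_seq_start: int,
--     i_k_seq_tile: int,
--     k_seq_tile_size: int,
--     sliding_window: int,
-- ) -> Tuple[List[bool], bool]:
--     """
--     Determine which tiles require computation based on causal and sliding window masks.
--
--     Args:
--         q_tile_group_size (int): Number of query tiles in the group.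
--         use_causal_mask (bool): Whether to apply causal masking.
--         i_q_seq_tile (int): Current query sequence tile index.
--         q_seq_tile_size (int): Size of each query tile.
--         k_seq_start (int): Starting position of key sequence.
--         i_k_seq_tile (int): Current key sequence tile index.
--         k_seq_tile_size (int): Size of each key tile.
--         sliding_window (int): Sliding window size.
--
--     Returns:
--         Tuple[List[bool], bool]: Tuple of (tile_required, any_tile_required):
--             - tile_required: List of booleans indicating if each tile needs computation.
--             - any_tile_required: True if at least one tile requires computation.
--     """
--     tile_required = []
--     any_tile_required = False
--
--     for i_q_tile_group_size in range(q_tile_group_size):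
--         # Tile-level early exit: Skip tiles where no query token can attend to any key token.
--         if use_causal_mask:
--             # Causal: max query position >= min key position
--             q_tile_max_pos = (i_q_seq_tile + i_q_tile_group_size + 1) * q_seq_tile_size - 1
--             k_tile_min_pos = k_seq_start + i_k_seq_tile * k_seq_tile_size
--             _tile_required = q_tile_max_pos >= k_tile_min_pos
--
--             if sliding_window > 0:
--                 # Sliding window: max key position >= earliest position any query can attend to
--                 q_tile_min_pos = (i_q_seq_tile + i_q_tile_group_size) * q_seq_tile_size
--                 k_tile_max_pos = k_seq_start + (i_k_seq_tile + 1) * k_seq_tile_size - 1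
--                 earliest_attendable_pos = q_tile_min_pos - sliding_window + 1
--                 _tile_required = _tile_required and (k_tile_max_pos >= earliest_attendable_pos)
--
--             tile_required.append(_tile_required)
--             any_tile_required = any_tile_required or _tile_required
--         else:
--             tile_required.append(True)
--             any_tile_required = True
--
--     return tile_required, any_tile_required
-- ===== SOURCE B (Python) =====
-- from typing import List, Tuple
--
-- def get_required_tiles_mask(
--     q_tile_group_size: int,
--     use_causal_mask: bool,
--     i_q_seq_tile: int,
--     q_seq_tile_size: int,
--     k_seq_start: int,
--     i_k_seq_tile: int,
--     k_seq_tile_size: int,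
--     sliding_window: int,
-- ) -> Tuple[List[bool], bool]:
--     """Closed-form tile mask: both per-tile tests are affine in the tile index,
--     so the required tiles form one contiguous index interval [lo, hi]; compute
--     its bounds with one ceiling/floor division each and emit the mask as three
--     replicate blocks."""
--     n = q_tile_group_size
--     if not use_causal_mask:
--         return [True] * n, n > 0
--
--     ts = q_seq_tile_size
--     k_tile_min_pos = k_seq_start + i_k_seq_tile * k_seq_tile_size
--     k_tile_max_pos = k_seq_start + (i_k_seq_tile + 1) * k_seq_tile_size - 1
--
--     # Causal: the last query position of tile i reaches the key tile,
--     #   (i_q_seq_tile + i + 1) * ts - 1 >= k_tile_min_pos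
--     #   <=>  i >= ceil((k_tile_min_pos + 1 - (i_q_seq_tile + 1) * ts) / ts)
--     lo = -((-(k_tile_min_pos + 1 - (i_q_seq_tile + 1) * ts)) // ts)
--
--     if sliding_window > 0:
--         # Sliding window: the first query position of tile i still sees the key tile,
--         #   k_tile_max_pos >= (i_q_seq_tile + i) * ts - sliding_window + 1
--         #   <=>  i <= (k_tile_max_pos + sliding_window - 1 - i_q_seq_tile * ts) // ts
--         hi = (k_tile_max_pos + sliding_window - 1 - i_q_seq_tile * ts) // ts
--     else:
--         hi = n - 1
--
--     start = max(lo, 0)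
--     end = min(hi, n - 1)
--     if start > end:
--         return [False] * n, False
--     return [False] * start + [True] * (end - start + 1) + [False] * (n - 1 - end), True
-- ===== Notes on version B (the rewrite author's own statement) =====
-- stated objective: faster
-- what changed: B replaces A's per-index loop that re-evaluates both mask inequalities at every tile by a closed-form interval: each affine condition is solved once for the tile index with a ceiling/floor division, and the mask is emitted as three replicate blocks; Pre_ restricts the causal branch to positive query tile sizes, the function's natural domain, since B's interval derivation divides by the tile size.
-- outside the precondition, e.g. on get_required_tiles_mask(2, True, 0, 0, 0, 0, 1, 0): A returns ([False, False], False), B raises ZeroDivisionError; on get_required_tiles_mask(2, True, 0, -1, 0, 0, 1, 0): A returns ([False, False], False), B returns ([True, True], True)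
import Mathlib
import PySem

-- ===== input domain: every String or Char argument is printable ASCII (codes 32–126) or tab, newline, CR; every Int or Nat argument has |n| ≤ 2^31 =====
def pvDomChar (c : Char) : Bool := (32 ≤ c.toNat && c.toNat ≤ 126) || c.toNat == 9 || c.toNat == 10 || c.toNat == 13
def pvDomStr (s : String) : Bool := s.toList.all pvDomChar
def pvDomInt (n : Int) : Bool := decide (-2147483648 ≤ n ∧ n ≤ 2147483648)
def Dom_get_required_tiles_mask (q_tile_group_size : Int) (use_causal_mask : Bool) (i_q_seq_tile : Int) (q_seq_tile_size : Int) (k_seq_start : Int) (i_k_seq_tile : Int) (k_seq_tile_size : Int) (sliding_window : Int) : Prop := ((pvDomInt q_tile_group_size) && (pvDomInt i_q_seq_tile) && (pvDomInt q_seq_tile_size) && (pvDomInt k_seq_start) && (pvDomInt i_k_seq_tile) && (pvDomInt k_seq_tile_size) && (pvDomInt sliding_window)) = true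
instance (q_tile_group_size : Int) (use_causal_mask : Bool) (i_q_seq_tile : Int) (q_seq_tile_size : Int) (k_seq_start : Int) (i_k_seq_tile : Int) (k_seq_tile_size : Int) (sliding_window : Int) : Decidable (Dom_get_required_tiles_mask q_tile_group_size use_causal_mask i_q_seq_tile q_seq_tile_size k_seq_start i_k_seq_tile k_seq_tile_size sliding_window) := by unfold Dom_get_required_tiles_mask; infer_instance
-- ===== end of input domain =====

-- B computes the contiguous required-tile interval in closed form (one ceiling and one
-- floor division) and builds the mask from three replicate blocks, instead of A's
-- per-index loop; Pre_ restricts the causal branch to positive query tile sizes.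


-- ===== PORT A =====
-- literal transliteration of A's loop: fold over range(q_tile_group_size),
-- state = (tile_required, any_tile_required)
def get_required_tiles_mask (q_tile_group_size : Int) (use_causal_mask : Bool) (i_q_seq_tile : Int) (q_seq_tile_size : Int) (k_seq_start : Int) (i_k_seq_tile : Int) (k_seq_tile_size : Int) (sliding_window : Int) : List Bool × Bool :=
  (PySem.List.pyRange 0 q_tile_group_size 1).foldl
    (fun st i =>
      if use_causal_mask then
        let q_tile_max_pos := (i_q_seq_tile + i + 1) * q_seq_tile_size - 1
        let k_tile_min_pos := k_seq_start + i_k_seq_tile * k_seq_tile_size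
        let tr0 := decide (q_tile_max_pos ≥ k_tile_min_pos)
        let tr :=
          if sliding_window > 0 then
            let q_tile_min_pos := (i_q_seq_tile + i) * q_seq_tile_size
            let k_tile_max_pos := k_seq_start + (i_k_seq_tile + 1) * k_seq_tile_size - 1
            let earliest_attendable_pos := q_tile_min_pos - sliding_window + 1
            tr0 && decide (k_tile_max_pos ≥ earliest_attendable_pos)
          else tr0
        (st.1 ++ [tr], st.2 || tr)
      else
        (st.1 ++ [true], true))
    ([], false)

-- ===== PORT B =====
-- transliteration of Source B: closed-form interval [lo, hi], mask emitted as replicate blocks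
def get_required_tiles_mask_alt (q_tile_group_size : Int) (use_causal_mask : Bool) (i_q_seq_tile : Int) (q_seq_tile_size : Int) (k_seq_start : Int) (i_k_seq_tile : Int) (k_seq_tile_size : Int) (sliding_window : Int) : List Bool × Bool :=
  let n := q_tile_group_size
  if !use_causal_mask then (List.replicate n.toNat true, decide (n > 0))
  else
    let ts := q_seq_tile_size
    let k_tile_min_pos := k_seq_start + i_k_seq_tile * k_seq_tile_size
    let k_tile_max_pos := k_seq_start + (i_k_seq_tile + 1) * k_seq_tile_size - 1
    let lo := -(PySem.Int.floordiv (-(k_tile_min_pos + 1 - (i_q_seq_tile + 1) * ts)) ts)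
    let hi := if sliding_window > 0 then
        PySem.Int.floordiv (k_tile_max_pos + sliding_window - 1 - i_q_seq_tile * ts) ts
      else n - 1
    let s := max lo 0
    let e := min hi (n - 1)
    if s > e then (List.replicate n.toNat false, false)
    else (List.replicate s.toNat false ++ List.replicate (e - s + 1).toNat true ++ List.replicate (n - 1 - e).toNat false, true)

-- ===== PRECONDITION & SPEC =====
-- Pre_ narrows the causal branch to positive query tile sizes — the function's natural
-- domain: A still returns values for a zero or negative tile size, but the position
-- formulas are meaningless there and B's interval derivation divides by the tile size.
def Pre_get_required_tiles_mask (q_tile_group_size : Int) (use_causal_mask : Bool) (i_q_seq_tile : Int) (q_seq_tile_size : Int) (k_seq_start : Int) (i_k_seq_tile : Int) (k_seq_tile_size : Int) (sliding_window : Int) : Prop :=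
  use_causal_mask = true → 0 < q_seq_tile_size
instance (q_tile_group_size : Int) (use_causal_mask : Bool) (i_q_seq_tile : Int) (q_seq_tile_size : Int) (k_seq_start : Int) (i_k_seq_tile : Int) (k_seq_tile_size : Int) (sliding_window : Int) : Decidable (Pre_get_required_tiles_mask q_tile_group_size use_causal_mask i_q_seq_tile q_seq_tile_size k_seq_start i_k_seq_tile k_seq_tile_size sliding_window) := by unfold Pre_get_required_tiles_mask; infer_instance
def pvWitness_get_required_tiles_mask : Int × Bool × Int × Int × Int × Int × Int × Int := (4, true, 0, 2, 0, 0, 2, 0)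
def Spec_get_required_tiles_mask (q_tile_group_size : Int) (use_causal_mask : Bool) (i_q_seq_tile : Int) (q_seq_tile_size : Int) (k_seq_start : Int) (i_k_seq_tile : Int) (k_seq_tile_size : Int) (sliding_window : Int) (out : List Bool × Bool) : Prop := out = get_required_tiles_mask_alt q_tile_group_size use_causal_mask i_q_seq_tile q_seq_tile_size k_seq_start i_k_seq_tile k_seq_tile_size sliding_window
instance (q_tile_group_size : Int) (use_causal_mask : Bool) (i_q_seq_tile : Int) (q_seq_tile_size : Int) (k_seq_start : Int) (i_k_seq_tile : Int) (k_seq_tile_size : Int) (sliding_window : Int) (out : List Bool × Bool) : Decidable (Spec_get_required_tiles_mask q_tile_group_size use_causal_mask i_q_seq_tile q_seq_tile_size k_seq_start i_k_seq_tile k_seq_tile_size sliding_window out) := by unfold Spec_get_required_tiles_mask; infer_instance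

-- ===== CLAIM (what is proved, stated in full; the proofs are below) =====
def Claim_equal_get_required_tiles_mask : Prop := ∀ (q_tile_group_size : Int) (use_causal_mask : Bool) (i_q_seq_tile : Int) (q_seq_tile_size : Int) (k_seq_start : Int) (i_k_seq_tile : Int) (k_seq_tile_size : Int) (sliding_window : Int), Dom_get_required_tiles_mask q_tile_group_size use_causal_mask i_q_seq_tile q_seq_tile_size k_seq_start i_k_seq_tile k_seq_tile_size sliding_window → Pre_get_required_tiles_mask q_tile_group_size use_causal_mask i_q_seq_tile q_seq_tile_size k_seq_start i_k_seq_tile k_seq_tile_size sliding_window → Spec_get_required_tiles_mask q_tile_group_size use_causal_mask i_q_seq_tile q_seq_tile_size k_seq_start i_k_seq_tile k_seq_tile_size sliding_window (get_required_tiles_mask q_tile_group_size use_causal_mask i_q_seq_tile q_seq_tile_size k_seq_start i_k_seq_tile k_seq_tile_size sliding_window)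

-- ===== LEMMAS AND PROOFS =====

-- the bool accumulator of A's loop is the 'any' of the appended flags
lemma pv_foldl_or_any (f : Int → Bool) (l : List Int) (b : Bool) :
    l.foldl (fun acc i => acc || f i) b = (b || l.any f) := by
  induction l generalizing b with
  | nil => simp
  | cons x t ih => simp [List.foldl_cons, ih, Bool.or_assoc]

-- a range segment on which f is constant maps to a replicate block
lemma pv_map_const_seg (f : Int → Bool) (a b : Int) (c : Bool)
    (h : ∀ i : Int, a ≤ i → i < b → f i = c) :
    (PySem.List.pyRange a b 1).map f = List.replicate (b - a).toNat c := by
  rw [PySem.List.pyRange_one, List.map_map]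
  have : ∀ x ∈ List.range (b - a).toNat, (f ∘ fun k : Nat => a + (k : Int)) x = c := by
    intro x hx
    simp only [List.mem_range] at hx
    simp only [Function.comp_apply]
    exact h (a + x) (by omega) (by omega)
  rw [List.map_congr_left this, List.map_const', List.length_range]

lemma pv_pointwise_map (f g : Int → Bool) (n : Int)
    (h : ∀ i : Int, 0 ≤ i → i < n → f i = g i) :
    (PySem.List.pyRange 0 n 1).map f = (PySem.List.pyRange 0 n 1).map g := by
  refine List.map_congr_left (fun x hx => ?_)
  rw [PySem.List.mem_pyRange_one] at hx
  exact h x hx.1 hx.2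

lemma pv_pointwise_any (f g : Int → Bool) (n : Int)
    (h : ∀ i : Int, 0 ≤ i → i < n → f i = g i) :
    (PySem.List.pyRange 0 n 1).any f = (PySem.List.pyRange 0 n 1).any g := by
  have h1 : (PySem.List.pyRange 0 n 1).any f = ((PySem.List.pyRange 0 n 1).map f).any id := by
    simp [List.any_map]
  have h2 : (PySem.List.pyRange 0 n 1).any g = ((PySem.List.pyRange 0 n 1).map g).any id := by
    simp [List.any_map]
  rw [h1, h2, pv_pointwise_map f g n h]

-- the non-causal loop appends True each step and sets the flag on any step
lemma pv_fold_true (l : List Int) (acc : List Bool) (b : Bool) :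
    l.foldl (fun (st : List Bool × Bool) (_ : Int) => (st.1 ++ [true], true)) (acc, b) =
      (acc ++ List.replicate l.length true, b || !l.isEmpty) := by
  induction l generalizing acc b with
  | nil => simp
  | cons x t ih =>
    simp only [List.foldl_cons, ih, List.length_cons, List.replicate_succ, List.isEmpty_cons]
    simp [List.append_assoc]

-- the interval mask as three replicate blocks
lemma pv_interval_mask (s e n : Int) (hs : 0 ≤ s) (he : e ≤ n - 1) (hse : s ≤ e) :
    (PySem.List.pyRange 0 n 1).map (fun i => decide (s ≤ i ∧ i ≤ e)) =
      List.replicate s.toNat false ++ List.replicate (e - s + 1).toNat true ++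
        List.replicate (n - 1 - e).toNat false := by
  rw [PySem.List.pyRange_one_append 0 s n (by omega) (by omega),
      PySem.List.pyRange_one_append s (e + 1) n (by omega) (by omega)]
  rw [List.map_append, List.map_append]
  rw [pv_map_const_seg _ 0 s false (fun i h1 h2 => by simp; omega),
      pv_map_const_seg _ s (e + 1) true (fun i h1 h2 => by simp; omega),
      pv_map_const_seg _ (e + 1) n false (fun i h1 h2 => by simp; omega)]
  have h1 : ((s : Int) - 0).toNat = s.toNat := by omega
  have h2 : (e + 1 - s).toNat = (e - s + 1).toNat := by omega
  have h3 : (n - (e + 1)).toNat = (n - 1 - e).toNat := by omega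
  rw [h1, h2, h3, List.append_assoc]

lemma pv_interval_empty (s e n : Int) (hse : e < s) :
    (PySem.List.pyRange 0 n 1).map (fun i => decide (s ≤ i ∧ i ≤ e)) =
      List.replicate n.toNat false := by
  have := pv_map_const_seg (fun i => decide (s ≤ i ∧ i ≤ e)) 0 n false
    (fun i h1 h2 => by simp; omega)
  simpa using this

lemma pv_any_interval_true (s e n : Int) (hs : 0 ≤ s) (he : e ≤ n - 1) (hse : s ≤ e) :
    (PySem.List.pyRange 0 n 1).any (fun i => decide (s ≤ i ∧ i ≤ e)) = true := by
  rw [List.any_eq_true]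
  exact ⟨s, by rw [PySem.List.mem_pyRange_one]; omega, by simp; omega⟩

lemma pv_any_interval_false (s e n : Int) (hse : e < s) :
    (PySem.List.pyRange 0 n 1).any (fun i => decide (s ≤ i ∧ i ≤ e)) = false := by
  rw [List.any_eq_false]
  intro x hx
  simp
  omega

-- ceiling lower bound: -((-c) // q) ≤ i  ↔  c ≤ q * i   (0 < q)
lemma pv_lb_iff (c q i : Int) (hq : 0 < q) :
    (-(PySem.Int.floordiv (-c) q) ≤ i) ↔ c ≤ q * i := by
  rw [neg_le, PySem.Int.le_floordiv_iff_mul_le hq]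
  constructor <;> intro h <;> nlinarith

-- floor upper bound: i ≤ c // q  ↔  q * i ≤ c   (0 < q)
lemma pv_ub_iff (c q i : Int) (hq : 0 < q) :
    (i ≤ PySem.Int.floordiv c q) ↔ q * i ≤ c := by
  rw [PySem.Int.le_floordiv_iff_mul_le hq]
  constructor <;> intro h <;> nlinarith

-- ===== VERDICT (by name: the statement is the Claim_ definition above) =====
theorem get_required_tiles_mask_spec : Claim_equal_get_required_tiles_mask := by
  intro n ucm iq q ks ik k sw _ hpre
  unfold Spec_get_required_tiles_mask get_required_tiles_mask get_required_tiles_mask_alt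
  cases ucm with
  | false =>
    simp only [Bool.false_eq_true, if_false, Bool.not_false, if_true]
    rw [pv_fold_true, PySem.List.length_pyRange_one]
    by_cases hn : 0 < n
    · rw [PySem.List.pyRange_one_cons (by omega)]
      simp [hn]
    · rw [PySem.List.pyRange_one_eq_nil (by omega)]
      have hn' : ¬ (n > 0) := hn
      simp [hn']
  | true =>
    have hq : 0 < q := hpre rfl
    simp only [if_true, Bool.not_true, Bool.false_eq_true, if_false]
    -- A's per-index flag
    set g : Int → Bool := fun i =>
      if sw > 0 then
        decide ((iq + i + 1) * q - 1 ≥ ks + ik * k) &&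
          decide (ks + (ik + 1) * k - 1 ≥ (iq + i) * q - sw + 1)
      else decide ((iq + i + 1) * q - 1 ≥ ks + ik * k) with hg
    have hstep : (fun (st : List Bool × Bool) (i : Int) =>
        (st.1 ++ [if sw > 0 then
            decide ((iq + i + 1) * q - 1 ≥ ks + ik * k) &&
              decide (ks + (ik + 1) * k - 1 ≥ (iq + i) * q - sw + 1)
          else decide ((iq + i + 1) * q - 1 ≥ ks + ik * k)],
         st.2 || (if sw > 0 then
            decide ((iq + i + 1) * q - 1 ≥ ks + ik * k) &&
              decide (ks + (ik + 1) * k - 1 ≥ (iq + i) * q - sw + 1)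
          else decide ((iq + i + 1) * q - 1 ≥ ks + ik * k)))) =
        (fun (st : List Bool × Bool) (i : Int) => (st.1 ++ [g i], st.2 || g i)) := by
      funext st i; rw [hg]
    rw [hstep, PySem.List.foldl_prod_mk (fun (l : List Bool) (i : Int) => l ++ [g i])
      (fun (b : Bool) (i : Int) => b || g i) (PySem.List.pyRange 0 n 1) [] false,
      PySem.List.foldl_append_singleton_eq_map g (PySem.List.pyRange 0 n 1) [],
      pv_foldl_or_any]
    -- B's abbreviations
    set lo : Int := -(PySem.Int.floordiv (-(ks + ik * k + 1 - (iq + 1) * q)) q) with hlo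
    set hi : Int := (if sw > 0 then
        PySem.Int.floordiv (ks + (ik + 1) * k - 1 + sw - 1 - iq * q) q
      else n - 1) with hhi
    set s : Int := max lo 0 with hs
    set e : Int := min hi (n - 1) with he
    -- pointwise: A's flag is the interval test
    have hpt : ∀ i : Int, 0 ≤ i → i < n → g i = decide (s ≤ i ∧ i ≤ e) := by
      intro i h0 hn
      have hiff : (g i = true) ↔ (lo ≤ i ∧ i ≤ hi) := by
        simp only [hg]
        have h1 := pv_lb_iff (ks + ik * k + 1 - (iq + 1) * q) q i hq
        rw [← hlo] at h1
        by_cases hw : sw > 0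
        · have h2 := pv_ub_iff (ks + (ik + 1) * k - 1 + sw - 1 - iq * q) q i hq
          simp only [hhi, if_pos hw, Bool.and_eq_true, decide_eq_true_eq] at *
          constructor
          · rintro ⟨hA, hB⟩
            exact ⟨h1.mpr (by nlinarith), h2.mpr (by nlinarith)⟩
          · rintro ⟨hA, hB⟩
            have hA' := h1.mp hA
            have hB' := h2.mp hB
            constructor <;> nlinarith
        · simp only [hhi, if_neg hw, decide_eq_true_eq]
          constructor
          · intro hA
            exact ⟨h1.mpr (by nlinarith), by omega⟩
          · rintro ⟨hA, _⟩
            have hA' := h1.mp hA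
            nlinarith
      have hse : (s ≤ i ∧ i ≤ e) ↔ (lo ≤ i ∧ i ≤ hi) := by
        rw [hs, he, max_le_iff, le_min_iff]
        constructor
        · rintro ⟨⟨x, _⟩, ⟨y, _⟩⟩
          exact ⟨x, y⟩
        · rintro ⟨x, y⟩
          exact ⟨⟨x, h0⟩, ⟨y, by omega⟩⟩
      have hfin := hiff.trans hse.symm
      cases hgi : g i
      · symm
        rw [decide_eq_false_iff_not]
        intro hC
        have := hfin.mpr hC
        rw [hgi] at this
        exact Bool.false_ne_true this
      · symm
        rw [decide_eq_true_eq]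
        exact hfin.mp hgi
    rw [pv_pointwise_map g _ n hpt, pv_pointwise_any g _ n hpt]
    by_cases hse : s > e
    · rw [if_pos hse, pv_interval_empty s e n (by omega),
        pv_any_interval_false s e n (by omega)]
      simp
    · rw [if_neg hse]
      have hs0 : 0 ≤ s := by rw [hs]; exact le_max_right _ _
      have hen : e ≤ n - 1 := by rw [he]; exact min_le_right _ _
      rw [pv_interval_mask s e n hs0 hen (by omega),
        pv_any_interval_true s e n hs0 hen (by omega)]
      simp
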